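-- pv_equiv track=rewrite | github.com/TedYav/CodingChallenges | HackerRank/Algorithms/dp/brick_stack.py | calculate_solid_walls
-- ===== SOURCE A (Python) =====
-- def calculate_solid_walls(width, wall_memo, modulus):
-- 	solid_wall_memo = [0 for i in range(width+1)]
-- 	solid_wall_memo[1] = 1
-- 	for i in range(2, width+1):
-- 		invalid_walls = 0
-- 		for j in range(1,i):
-- 			invalid_walls += solid_wall_memo[j] * wall_memo[i-j]
-- 			invalid_walls %= modulus
-- 		solid_wall_memo[i] = (wall_memo[i] - invalid_walls) % modulus
-- 	return solid_wall_memo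
-- ===== SOURCE B (Python) =====
-- def calculate_solid_walls(width, wall_memo, modulus):
-- 	# scatter/push DP: finalize solid[i], then push its contribution forward
-- 	solid = [0] * (width + 1)
-- 	solid[1] = 1
-- 	invalid = [0] * (width + 1)
-- 	for i in range(1, width + 1):
-- 		if i >= 2:
-- 			solid[i] = (wall_memo[i] - invalid[i]) % modulus
-- 		si = solid[i]
-- 		for j in range(i + 1, width + 1):
-- 			invalid[j] = (invalid[j] + si * wall_memo[j - i]) % modulus
-- 	return solid
-- ===== Notes on version B (the rewrite author's own statement) =====
-- stated objective: alternative
-- what changed: Replaces the per-i inner gather (summing solid[j]*wall_memo[i-j] backwards at each i) by a scatter/push DP that finalizes solid[i] from a forward-accumulated invalid[] table and then pushes solid[i]*wall_memo[j-i] into every later invalid[j].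
import Mathlib
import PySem

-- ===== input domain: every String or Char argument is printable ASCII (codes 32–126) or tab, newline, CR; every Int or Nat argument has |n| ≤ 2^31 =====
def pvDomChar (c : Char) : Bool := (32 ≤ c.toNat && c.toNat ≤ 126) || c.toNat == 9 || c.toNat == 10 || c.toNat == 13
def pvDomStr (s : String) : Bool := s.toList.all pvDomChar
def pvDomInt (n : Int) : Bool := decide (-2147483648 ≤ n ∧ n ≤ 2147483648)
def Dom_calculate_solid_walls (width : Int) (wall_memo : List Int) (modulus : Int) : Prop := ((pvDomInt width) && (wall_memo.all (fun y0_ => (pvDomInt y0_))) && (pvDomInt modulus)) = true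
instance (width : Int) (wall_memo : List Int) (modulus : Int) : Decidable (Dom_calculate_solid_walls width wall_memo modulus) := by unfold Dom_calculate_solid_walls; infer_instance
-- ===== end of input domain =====

-- B replaces A's per-i backward gather loop by a scatter/push DP over a forward-accumulated invalid[] table
-- (alternative decomposition, same asymptotic cost).

-- ===== PORT A =====
def calculate_solid_walls (width : Int) (wall_memo : List Int) (modulus : Int) : List Int :=
  let solid_wall_memo := (PySem.List.pyRange 0 (width+1)).map (fun _ => (0 : Int))
  let solid_wall_memo := PySem.List.pySetD solid_wall_memo 1 1
  (PySem.List.pyRange 2 (width+1)).foldl (fun solid_wall_memo i =>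
    let invalid_walls := (PySem.List.pyRange 1 i).foldl (fun invalid_walls j =>
      PySem.Int.mod (invalid_walls + PySem.List.pyGetD solid_wall_memo j 0 * PySem.List.pyGetD wall_memo (i - j) 0) modulus) 0
    PySem.List.pySetD solid_wall_memo i (PySem.Int.mod (PySem.List.pyGetD wall_memo i 0 - invalid_walls) modulus))
    solid_wall_memo

-- ===== PORT B =====
def calculate_solid_walls_alt (width : Int) (wall_memo : List Int) (modulus : Int) : List Int :=
  let solid0 := PySem.List.pySetD (List.replicate (width+1).toNat (0 : Int)) 1 1
  let invalid0 := List.replicate (width+1).toNat (0 : Int)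
  let st := (PySem.List.pyRange 1 (width+1)).foldl (fun (st : List Int × List Int) i =>
    let solid := if 2 ≤ i then
        PySem.List.pySetD st.1 i (PySem.Int.mod (PySem.List.pyGetD wall_memo i 0 - PySem.List.pyGetD st.2 i 0) modulus)
      else st.1
    let si := PySem.List.pyGetD solid i 0
    let invalid := (PySem.List.pyRange (i+1) (width+1)).foldl (fun inv j =>
      PySem.List.pySetD inv j (PySem.Int.mod (PySem.List.pyGetD inv j 0 + si * PySem.List.pyGetD wall_memo (j - i) 0) modulus)) st.2
    (solid, invalid)) (solid0, invalid0)
  st.1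

-- ===== PRECONDITION & SPEC =====
-- Pre_ excludes exactly the inputs on which Python A raises: width < 1 (IndexError on solid[1]),
-- and for width ≥ 2 a zero modulus (ZeroDivisionError) or wall_memo shorter than width+1 (IndexError).
-- (Python B raises on exactly the same inputs; the ports use the total pyGetD/pySetD variants there.)
def Pre_calculate_solid_walls (width : Int) (wall_memo : List Int) (modulus : Int) : Prop :=
  1 ≤ width ∧ (2 ≤ width → modulus ≠ 0 ∧ width < (wall_memo.length : Int))
instance (width : Int) (wall_memo : List Int) (modulus : Int) : Decidable (Pre_calculate_solid_walls width wall_memo modulus) := by unfold Pre_calculate_solid_walls; infer_instance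
def pvWitness_calculate_solid_walls : Int × List Int × Int := (2, [0, 0, 1], 5)

def Spec_calculate_solid_walls (width : Int) (wall_memo : List Int) (modulus : Int) (out : List Int) : Prop := out = calculate_solid_walls_alt width wall_memo modulus
instance (width : Int) (wall_memo : List Int) (modulus : Int) (out : List Int) : Decidable (Spec_calculate_solid_walls width wall_memo modulus out) := by unfold Spec_calculate_solid_walls; infer_instance

-- ===== CLAIM (what is proved, stated in full; the proofs are below) =====
def Claim_equal_calculate_solid_walls : Prop := ∀ (width : Int) (wall_memo : List Int) (modulus : Int), Dom_calculate_solid_walls width wall_memo modulus → Pre_calculate_solid_walls width wall_memo modulus → Spec_calculate_solid_walls width wall_memo modulus (calculate_solid_walls width wall_memo modulus)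

-- ===== LEMMAS AND PROOFS =====

-- A's outer-loop body, named
def pvStepA (wall_memo : List Int) (modulus : Int) (solid : List Int) (i : Int) : List Int :=
  PySem.List.pySetD solid i (PySem.Int.mod (PySem.List.pyGetD wall_memo i 0 -
    (PySem.List.pyRange 1 i).foldl (fun invalid_walls j =>
      PySem.Int.mod (invalid_walls + PySem.List.pyGetD solid j 0 * PySem.List.pyGetD wall_memo (i - j) 0) modulus) 0) modulus)

-- B's outer-loop body, named
def pvStepB (wall_memo : List Int) (modulus : Int) (width : Int) (st : List Int × List Int) (i : Int) : List Int × List Int :=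
  let solid := if 2 ≤ i then
      PySem.List.pySetD st.1 i (PySem.Int.mod (PySem.List.pyGetD wall_memo i 0 - PySem.List.pyGetD st.2 i 0) modulus)
    else st.1
  (solid, (PySem.List.pyRange (i+1) (width+1)).foldl (fun inv j =>
      PySem.List.pySetD inv j (PySem.Int.mod (PySem.List.pyGetD inv j 0 + PySem.List.pyGetD solid i 0 * PySem.List.pyGetD wall_memo (j - i) 0) modulus)) st.2)

-- the gather value: fold of solid[j]*wall_memo[t-j] for j = 1 .. E-1, reduced mod modulus at each step
def pvInner (wall_memo : List Int) (modulus : Int) (solid : List Int) (E t : Int) : Int :=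
  (PySem.List.pyRange 1 E).foldl (fun invalid_walls j =>
    PySem.Int.mod (invalid_walls + PySem.List.pyGetD solid j 0 * PySem.List.pyGetD wall_memo (t - j) 0) modulus) 0

lemma pvA_eq (width : Int) (wall_memo : List Int) (modulus : Int) :
    calculate_solid_walls width wall_memo modulus
      = (PySem.List.pyRange 2 (width+1)).foldl (pvStepA wall_memo modulus)
          (PySem.List.pySetD ((PySem.List.pyRange 0 (width+1)).map (fun _ => (0 : Int))) 1 1) := rfl

lemma pvB_eq (width : Int) (wall_memo : List Int) (modulus : Int) :
    calculate_solid_walls_alt width wall_memo modulus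
      = ((PySem.List.pyRange 1 (width+1)).foldl (pvStepB wall_memo modulus width)
          (PySem.List.pySetD (List.replicate (width+1).toNat (0 : Int)) 1 1,
           List.replicate (width+1).toNat (0 : Int))).1 := rfl

lemma pvGetD_setD_int (xs : List Int) (i t v : Int) (h0 : 0 ≤ i) (hi : i < (xs.length : Int)) (ht : 0 ≤ t) :
    PySem.List.pyGetD (PySem.List.pySetD xs i v) t 0 = if t = i then v else PySem.List.pyGetD xs t 0 := by
  obtain ⟨n, rfl⟩ := Int.eq_ofNat_of_zero_le h0
  obtain ⟨m, rfl⟩ := Int.eq_ofNat_of_zero_le ht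
  rw [PySem.List.pyGetD_pySetD_natCast xs n m v 0 (by exact_mod_cast hi)]
  simp [Nat.cast_inj]

lemma pvPushFold_len (f : Int → Int → Int) (c L : Int) (inv : List Int) :
    ((PySem.List.pyRange c L).foldl (fun acc j => PySem.List.pySetD acc j (f j (PySem.List.pyGetD acc j 0))) inv).length = inv.length := by
  induction' hn : (L - c).toNat with n ih generalizing c inv
  · rw [PySem.List.pyRange_one_eq_nil (by omega)]; rfl
  · rw [PySem.List.pyRange_one_cons (by omega : c < L)]
    simp only [List.foldl_cons]
    rw [ih (c+1) _ (by omega)]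
    exact PySem.List.length_pySetD _ _ _

lemma pvPushFold_getD (f : Int → Int → Int) (L : Int) (n : Nat) :
    ∀ (c : Int) (inv : List Int), 0 ≤ c → (L - c).toNat = n → L ≤ (inv.length : Int) →
    ∀ (t : Int), 0 ≤ t →
      PySem.List.pyGetD ((PySem.List.pyRange c L).foldl (fun acc j => PySem.List.pySetD acc j (f j (PySem.List.pyGetD acc j 0))) inv) t 0
        = if c ≤ t ∧ t < L then f t (PySem.List.pyGetD inv t 0) else PySem.List.pyGetD inv t 0 := by
  induction n with
  | zero =>
    intro c inv hc hn hL t ht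
    rw [PySem.List.pyRange_one_eq_nil (by omega)]
    simp only [List.foldl_nil]
    rw [if_neg (by omega)]
  | succ n ih =>
    intro c inv hc hn hL t ht
    rw [PySem.List.pyRange_one_cons (by omega : c < L)]
    simp only [List.foldl_cons]
    set inv1 := PySem.List.pySetD inv c (f c (PySem.List.pyGetD inv c 0)) with hinv1
    have hlen1 : inv1.length = inv.length := PySem.List.length_pySetD _ _ _
    rw [ih (c+1) inv1 (by omega) (by omega) (by rw [hlen1]; exact hL) t ht]
    have hget : PySem.List.pyGetD inv1 t 0 = if t = c then f c (PySem.List.pyGetD inv c 0) else PySem.List.pyGetD inv t 0 :=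
      pvGetD_setD_int inv c t _ hc (by omega) ht
    by_cases h1 : c + 1 ≤ t ∧ t < L
    · rw [if_pos h1, if_pos (by omega), hget, if_neg (by omega)]
    · rw [if_neg h1, hget]
      by_cases h2 : t = c
      · subst h2; rw [if_pos rfl, if_pos (by omega)]
      · rw [if_neg h2, if_neg (by omega)]

-- lockstep invariant: from index k on, A's gather state and B's scatter state produce the same walls
lemma pvMain (wall_memo : List Int) (modulus width : Int) (n : Nat) :
    ∀ (k : Int) (solid invalid : List Int), 2 ≤ k → (width + 1 - k).toNat = n →
    (solid.length : Int) = width + 1 → (invalid.length : Int) = width + 1 →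
    (∀ t : Int, k ≤ t → t < width + 1 → PySem.List.pyGetD invalid t 0 = pvInner wall_memo modulus solid k t) →
    (PySem.List.pyRange k (width+1)).foldl (pvStepA wall_memo modulus) solid
      = ((PySem.List.pyRange k (width+1)).foldl (pvStepB wall_memo modulus width) (solid, invalid)).1 := by
  induction n with
  | zero =>
    intro k solid invalid hk hn _ _ _
    rw [PySem.List.pyRange_one_eq_nil (by omega)]
    rfl
  | succ n ih =>
    intro k solid invalid hk hn hsl hil hinv
    have hkW : k < width + 1 := by omega
    rw [PySem.List.pyRange_one_cons hkW]
    simp only [List.foldl_cons]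
    set v := PySem.Int.mod (PySem.List.pyGetD wall_memo k 0 - pvInner wall_memo modulus solid k k) modulus with hv
    have hA : pvStepA wall_memo modulus solid k = PySem.List.pySetD solid k v := rfl
    have hBfst : (pvStepB wall_memo modulus width (solid, invalid) k).1 = PySem.List.pySetD solid k v := by
      simp only [pvStepB, if_pos hk]
      rw [hinv k le_rfl hkW]
    set solid' := PySem.List.pySetD solid k v with hsolid'
    have hsl' : (solid'.length : Int) = width + 1 := by
      rw [hsolid', PySem.List.length_pySetD]; exact hsl
    have hBsnd : (pvStepB wall_memo modulus width (solid, invalid) k).2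
        = (PySem.List.pyRange (k+1) (width+1)).foldl (fun inv j =>
            PySem.List.pySetD inv j ((fun j x => PySem.Int.mod (x + PySem.List.pyGetD solid' k 0 * PySem.List.pyGetD wall_memo (j - k) 0) modulus) j (PySem.List.pyGetD inv j 0))) invalid := by
      simp only [pvStepB, if_pos hk]
      rw [hinv k le_rfl hkW]
    set f : Int → Int → Int := fun j x => PySem.Int.mod (x + PySem.List.pyGetD solid' k 0 * PySem.List.pyGetD wall_memo (j - k) 0) modulus with hf
    set invalid' := (PySem.List.pyRange (k+1) (width+1)).foldl (fun inv j => PySem.List.pySetD inv j (f j (PySem.List.pyGetD inv j 0))) invalid with hinvalid'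
    have hil' : (invalid'.length : Int) = width + 1 := by
      rw [hinvalid', pvPushFold_len]; exact hil
    have hsame : ∀ j : Int, 0 ≤ j → j ≠ k → PySem.List.pyGetD solid' j 0 = PySem.List.pyGetD solid j 0 := by
      intro j hj hjk
      rw [hsolid', pvGetD_setD_int solid k j v (by omega) (by omega) hj, if_neg hjk]
    have hinv' : ∀ t : Int, k + 1 ≤ t → t < width + 1 → PySem.List.pyGetD invalid' t 0 = pvInner wall_memo modulus solid' (k+1) t := by
      intro t ht1 ht2
      rw [hinvalid', pvPushFold_getD f (width+1) (width - k).toNat (k+1) invalid (by omega) (by omega) (by omega) t (by omega), if_pos ⟨ht1, ht2⟩]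
      have hstep : pvInner wall_memo modulus solid' (k+1) t
          = PySem.Int.mod (pvInner wall_memo modulus solid' k t + PySem.List.pyGetD solid' k 0 * PySem.List.pyGetD wall_memo (t - k) 0) modulus := by
        unfold pvInner
        rw [PySem.List.pyRange_one_succ_right (by omega : (1:Int) ≤ k), List.foldl_append]
        rfl
      have hsame' : pvInner wall_memo modulus solid' k t = pvInner wall_memo modulus solid k t := by
        unfold pvInner
        apply PySem.List.foldl_congr_mem
        intro acc j hj
        rw [PySem.List.mem_pyRange_one] at hj
        rw [hsame j (by omega) (by omega)]
      rw [hstep, hsame', hinv t (by omega) ht2]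
    have hpair : pvStepB wall_memo modulus width (solid, invalid) k = (solid', invalid') := by
      rw [Prod.ext_iff]; exact ⟨hBfst, hBsnd⟩
    rw [hA, hpair]
    exact ih (k+1) solid' invalid' (by omega) (by omega) hsl' hil' hinv'

-- A's initial comprehension list is [0]*(width+1)
lemma pvInit (width : Int) :
    (PySem.List.pyRange 0 (width+1)).map (fun _ => (0 : Int)) = List.replicate (width+1).toNat 0 := by
  have hlen : ((PySem.List.pyRange 0 (width+1)).map (fun _ => (0 : Int))).length = (width+1).toNat := by
    rw [List.length_map, PySem.List.length_pyRange_one]; omega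
  rw [← hlen]
  apply List.eq_replicate_of_mem
  intro b hb
  rcases List.mem_map.mp hb with ⟨x, _, hx⟩
  exact hx.symm

lemma pvTop (width : Int) (wall_memo : List Int) (modulus : Int) (hw : 1 ≤ width) :
    calculate_solid_walls width wall_memo modulus = calculate_solid_walls_alt width wall_memo modulus := by
  rw [pvA_eq, pvB_eq, pvInit]
  set S1 := PySem.List.pySetD (List.replicate (width+1).toNat (0 : Int)) 1 1 with hS1
  set R0 := List.replicate (width+1).toNat (0 : Int) with hR0
  have hlenS1 : (S1.length : Int) = width + 1 := by
    rw [hS1, PySem.List.length_pySetD, hR0, List.length_replicate]; omega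
  have hlenR0 : (R0.length : Int) = width + 1 := by
    rw [hR0, List.length_replicate]; omega
  rw [PySem.List.pyRange_one_cons (by omega : (1:Int) < width + 1)]
  simp only [List.foldl_cons]
  set f : Int → Int → Int := fun j x =>
    PySem.Int.mod (x + PySem.List.pyGetD S1 1 0 * PySem.List.pyGetD wall_memo (j - 1) 0) modulus with hf
  set invalid1 := (PySem.List.pyRange (1+1) (width+1)).foldl
      (fun inv j => PySem.List.pySetD inv j (f j (PySem.List.pyGetD inv j 0))) R0 with hinvalid1
  have hstep1 : pvStepB wall_memo modulus width (S1, R0) 1 = (S1, invalid1) := by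
    simp only [pvStepB, if_neg (by norm_num : ¬ (2:Int) ≤ 1)]
    rfl
  rw [hstep1]
  have hlen1 : (invalid1.length : Int) = width + 1 := by
    rw [hinvalid1, pvPushFold_len]; exact hlenR0
  have hinv1 : ∀ t : Int, 2 ≤ t → t < width + 1 →
      PySem.List.pyGetD invalid1 t 0 = pvInner wall_memo modulus S1 2 t := by
    intro t ht1 ht2
    have hg := pvPushFold_getD f (width+1) (width - 1).toNat (1+1) R0 (by omega) (by omega) (by omega) t (by omega)
    rw [hinvalid1, hg, if_pos ⟨by omega, ht2⟩]
    have hR0t : PySem.List.pyGetD R0 t 0 = 0 := by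
      rw [PySem.List.pyGetD_eq_getElem R0 0 (by omega) (by omega)]
      simp [hR0]
    rw [hR0t]
    unfold pvInner
    have h12 : PySem.List.pyRange (1:Int) 2 = [1] := by decide
    rw [h12]
    simp only [List.foldl_cons, List.foldl_nil]
    rw [hf]
  exact pvMain wall_memo modulus width (width - 1).toNat 2 S1 invalid1 le_rfl (by omega) hlenS1 hlen1 hinv1

-- ===== VERDICT (by name: the statement is the Claim_ definition above) =====
theorem calculate_solid_walls_spec : Claim_equal_calculate_solid_walls := by
  intro width wall_memo modulus _hdom hpre
  show calculate_solid_walls width wall_memo modulus = calculate_solid_walls_alt width wall_memo modulus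
  exact pvTop width wall_memo modulus hpre.1
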